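-- pv_equiv track=rewrite | github.com/abneeshsingh21/-aari-backend | nlp_processor.py | _extract_file_name
-- ===== SOURCE A (Python) =====
-- def _extract_file_name(text: str) -> str:
--     """Extract file name from download command"""
--     # Remove common words
--     words = text.lower().split()
--     download_idx = next((i for i, w in enumerate(words) if "download" in w), -1)
--
--     if download_idx >= 0 and download_idx + 1 < len(words):
--         file_parts = words[download_idx + 1:]
--         # Filter out prepositions
--         file_name = " ".join([w for w in file_parts if w not in ["from", "on", "at"]])
--         return file_name
--     return ""
-- ===== SOURCE B (Python) =====
-- def _extract_file_name(text: str) -> str: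
--     # Single pass: locate the first word containing "download" and collect the
--     # following non-preposition words in the same traversal.
--     found = False
--     result = []
--     for w in text.lower().split():
--         if not found:
--             if "download" in w:
--                 found = True
--         elif w not in ("from", "on", "at"):
--             result.append(w)
--     return " ".join(result)
-- ===== Notes on version B (the rewrite author's own statement) =====
-- stated objective: alternative
-- what changed: Replaces the enumerate/next index search, slice and filtering comprehension by one fused pass over the words with a found-flag accumulator that collects non-preposition words after the first 'download' word.
import Mathlib
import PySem

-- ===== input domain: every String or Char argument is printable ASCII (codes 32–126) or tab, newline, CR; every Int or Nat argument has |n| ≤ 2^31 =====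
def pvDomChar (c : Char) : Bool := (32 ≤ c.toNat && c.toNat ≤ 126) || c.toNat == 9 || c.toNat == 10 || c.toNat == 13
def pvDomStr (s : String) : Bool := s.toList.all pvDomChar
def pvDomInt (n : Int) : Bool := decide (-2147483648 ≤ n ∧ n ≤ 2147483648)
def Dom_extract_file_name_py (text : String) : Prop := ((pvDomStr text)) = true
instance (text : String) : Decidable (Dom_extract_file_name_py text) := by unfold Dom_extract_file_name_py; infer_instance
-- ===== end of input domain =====

-- B fuses A's enumerate/next index search + slice + filter comprehension into one
-- flagged pass over the words (objective: alternative decomposition, same cost).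

-- ===== PORT A =====
-- next((i for i, w in enumerate(words) if "download" in w), -1): first-match index search
def pvNextIdx (ws : List String) (i : Int) : Int :=
  match ws with
  | [] => -1
  | w :: rest => if PySem.Str.isIn "download" w then i else pvNextIdx rest (i + 1)

def extract_file_name_py (text : String) : String :=
  let words := PySem.Str.split₀ (PySem.Str.lower text)
  let download_idx := pvNextIdx words 0
  if 0 ≤ download_idx ∧ download_idx + 1 < (words.length : Int) then
    let file_parts := PySem.List.slice words (some (download_idx + 1)) none
    PySem.Str.join " " (file_parts.filter (fun w => w ∉ (["from", "on", "at"] : List String)))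
  else ""

-- ===== PORT B =====
def pvStepB (st : Bool × List String) (w : String) : Bool × List String :=
  if st.1 = false then
    (if PySem.Str.isIn "download" w then (true, st.2) else st)
  else if w ∈ (["from", "on", "at"] : List String) then st
  else (st.1, st.2 ++ [w])

def extract_file_name_py_alt (text : String) : String :=
  PySem.Str.join " " (((PySem.Str.split₀ (PySem.Str.lower text)).foldl pvStepB (false, [])).2)

-- ===== PRECONDITION & SPEC =====
def Spec_extract_file_name_py (text : String) (out : String) : Prop := out = extract_file_name_py_alt text
instance (text : String) (out : String) : Decidable (Spec_extract_file_name_py text out) := by unfold Spec_extract_file_name_py; infer_instance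

-- ===== CLAIM (what is proved, stated in full; the proofs are below) =====
def Claim_equal_extract_file_name_py : Prop := ∀ (text : String), Dom_extract_file_name_py text → Spec_extract_file_name_py text (extract_file_name_py text)

-- ===== LEMMAS AND PROOFS =====

theorem pvNextIdx_lb (ws : List String) (i : Int) :
    pvNextIdx ws i = -1 ∨ i ≤ pvNextIdx ws i := by
  induction ws generalizing i with
  | nil => left; rfl
  | cons w rest ih =>
    simp only [pvNextIdx]
    split
    · right; exact le_refl i
    · rcases ih (i + 1) with h | h
      · left; exact h
      · right; omega

theorem pvNextIdx_shift (ws : List String) (i : Int) (hi : 0 ≤ i) :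
    pvNextIdx ws (i + 1) = if pvNextIdx ws i = -1 then -1 else pvNextIdx ws i + 1 := by
  induction ws generalizing i with
  | nil => rfl
  | cons w rest ih =>
    simp only [pvNextIdx]
    split
    · have : ¬ (i = -1) := by omega
      simp [this]
    · exact ih (i + 1) (by omega)

theorem pvFoldl_true (ws : List String) (acc : List String) :
    ws.foldl pvStepB (true, acc) =
      (true, acc ++ ws.filter (fun w => w ∉ (["from", "on", "at"] : List String))) := by
  induction ws generalizing acc with
  | nil => simp
  | cons w rest ih =>
    rw [List.foldl_cons, List.filter_cons]
    by_cases hw : w ∈ (["from", "on", "at"] : List String)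
    · have hstep : pvStepB (true, acc) w = (true, acc) := by
        simp only [pvStepB]
        rw [if_neg (by simp), if_pos hw]
      have hd : decide (w ∉ (["from", "on", "at"] : List String)) = false := by simp [hw]
      rw [hstep, ih, hd]
      simp
    · have hstep : pvStepB (true, acc) w = (true, acc ++ [w]) := by
        simp only [pvStepB]
        rw [if_neg (by simp), if_neg hw]
      have hd : decide (w ∉ (["from", "on", "at"] : List String)) = true := by simp [hw]
      rw [hstep, ih, hd]
      simp

theorem pvMain (words : List String) :
    (if 0 ≤ pvNextIdx words 0 ∧ pvNextIdx words 0 + 1 < (words.length : Int) then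
       PySem.Str.join " " ((PySem.List.slice words (some (pvNextIdx words 0 + 1)) none).filter
         (fun w => w ∉ (["from", "on", "at"] : List String)))
     else "") =
    PySem.Str.join " " ((words.foldl pvStepB (false, [])).2) := by
  induction words with
  | nil => decide
  | cons w rest ih =>
    by_cases hw : PySem.Str.isIn "download" w = true
    · -- first word already contains "download": index 0, A keeps the tail (filtered)
      simp only [pvNextIdx]
      rw [if_pos hw]
      have hstep : pvStepB (false, []) w = (true, []) := by
        simp only [pvStepB]
        rw [if_pos trivial, if_pos hw]
      rw [List.foldl_cons, hstep, pvFoldl_true]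
      have hslice : PySem.List.slice (w :: rest) (some ((0 : Int) + 1)) none = rest := by
        have h := PySem.List.slice_from (xs := w :: rest) (a := (0 : Int) + 1) (by omega)
        simpa using h
      rw [hslice]
      cases rest with
      | nil =>
        have hc : ¬ ((0 : Int) ≤ 0 ∧ (0 : Int) + 1 < ((w :: ([] : List String)).length : Int)) := by
          simp
        rw [if_neg hc]
        decide
      | cons r rs =>
        have hc : (0 : Int) ≤ 0 ∧ (0 : Int) + 1 < ((w :: r :: rs).length : Int) := by
          refine ⟨le_refl 0, ?_⟩
          simp only [List.length_cons]
          push_cast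
          omega
        rw [if_pos hc]
        simp
    · -- first word does not contain "download": both sides reduce to the tail's problem
      simp only [pvNextIdx]
      rw [if_neg hw]
      have hstep : pvStepB (false, []) w = (false, []) := by
        simp only [pvStepB]
        rw [if_pos trivial, if_neg hw]
      rw [List.foldl_cons, hstep, pvNextIdx_shift rest 0 (le_refl 0)]
      rcases pvNextIdx_lb rest 0 with h | h
      · rw [h]
        rw [if_pos rfl]
        have hc1 : ¬ ((0 : Int) ≤ -1 ∧ (-1 : Int) + 1 < ((w :: rest).length : Int)) := by omega
        rw [if_neg hc1, ← ih, h]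
        have hc2 : ¬ ((0 : Int) ≤ -1 ∧ (-1 : Int) + 1 < (rest.length : Int)) := by omega
        rw [if_neg hc2]
      · have hne : ¬ (pvNextIdx rest 0 = -1) := by omega
        rw [if_neg hne, ← ih]
        by_cases hcond : pvNextIdx rest 0 + 1 < (rest.length : Int)
        · have hc1 : (0 : Int) ≤ pvNextIdx rest 0 + 1 ∧
              pvNextIdx rest 0 + 1 + 1 < ((w :: rest).length : Int) := by
            simp only [List.length_cons]; push_cast; omega
          have hc2 : (0 : Int) ≤ pvNextIdx rest 0 ∧ pvNextIdx rest 0 + 1 < (rest.length : Int) :=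
            ⟨h, hcond⟩
          rw [if_pos hc1, if_pos hc2]
          have hs1 : PySem.List.slice (w :: rest) (some (pvNextIdx rest 0 + 1 + 1)) none
              = (w :: rest).drop (pvNextIdx rest 0 + 1 + 1).toNat :=
            PySem.List.slice_from (xs := w :: rest) (a := pvNextIdx rest 0 + 1 + 1) (by omega)
          have hs2 : PySem.List.slice rest (some (pvNextIdx rest 0 + 1)) none
              = rest.drop (pvNextIdx rest 0 + 1).toNat :=
            PySem.List.slice_from (xs := rest) (a := pvNextIdx rest 0 + 1) (by omega)
          have ht : (pvNextIdx rest 0 + 1 + 1).toNat = (pvNextIdx rest 0 + 1).toNat + 1 := by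
            omega
          rw [hs1, hs2, ht, List.drop_succ_cons]
        · have hc1 : ¬ ((0 : Int) ≤ pvNextIdx rest 0 + 1 ∧
              pvNextIdx rest 0 + 1 + 1 < ((w :: rest).length : Int)) := by
            simp only [List.length_cons]; push_cast; omega
          have hc2 : ¬ ((0 : Int) ≤ pvNextIdx rest 0 ∧
              pvNextIdx rest 0 + 1 < (rest.length : Int)) := by omega
          rw [if_neg hc1, if_neg hc2]

-- ===== VERDICT (by name: the statement is the Claim_ definition above) =====
theorem extract_file_name_py_spec : Claim_equal_extract_file_name_py := by
  intro text _
  unfold Spec_extract_file_name_py extract_file_name_py extract_file_name_py_alt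
  exact pvMain (PySem.Str.split₀ (PySem.Str.lower text))
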